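-- pv_equiv track=rewrite | github.com/warlocker64/Python-Uni | update2.py | nordland
-- ===== SOURCE A (Python) =====
-- def nordland(list3):
--
--     land = ["Sweden","Norway","Denmark","Finland","Iceland"]
--     länder = []
--     for w in land: # skapar for loops för att söka på de länder vi letar efter
--         for rad in list3:
--             if rad[0] == w:
--                 länder.append(rad)
--     return länder
-- ===== SOURCE B (Python) =====
-- def nordland(list3):
--     land = ["Sweden", "Norway", "Denmark", "Finland", "Iceland"]
--     nordic = set(land)
--     groups = {}
--     for rad in list3:
--         if rad[0] in nordic:
--             groups.setdefault(rad[0], []).append(rad)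
--     out = []
--     for w in land:
--         out.extend(groups.get(w, []))
--     return out
-- ===== Notes on version B (the rewrite author's own statement) =====
-- stated objective: alternative
-- what changed: B makes a single pass over list3 grouping matching rows into a dict keyed by country, then emits the groups in the fixed five-country order, instead of A's five full scans of list3.
import Mathlib
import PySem

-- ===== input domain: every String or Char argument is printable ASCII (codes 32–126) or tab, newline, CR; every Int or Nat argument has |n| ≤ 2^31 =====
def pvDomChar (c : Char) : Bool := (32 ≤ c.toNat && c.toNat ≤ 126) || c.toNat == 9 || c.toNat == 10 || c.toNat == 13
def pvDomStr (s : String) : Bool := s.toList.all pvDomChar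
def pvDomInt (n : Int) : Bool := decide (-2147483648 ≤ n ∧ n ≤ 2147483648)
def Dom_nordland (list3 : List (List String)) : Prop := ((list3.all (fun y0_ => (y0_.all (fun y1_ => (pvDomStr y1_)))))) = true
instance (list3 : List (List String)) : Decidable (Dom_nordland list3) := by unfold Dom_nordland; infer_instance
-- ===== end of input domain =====

-- B builds a country→rows dict in one pass and emits the five groups in order instead of A's five scans.

-- ===== PORT A =====
def nordland (list3 : List (List String)) : List (List String) :=
  let land := ["Sweden", "Norway", "Denmark", "Finland", "Iceland"]
  land.foldl (fun länder w =>
    list3.foldl (fun acc rad =>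
      if PySem.List.pyGet? rad 0 = some w then acc ++ [rad] else acc) länder) []

-- ===== PORT B =====
def nordland_alt (list3 : List (List String)) : List (List String) :=
  let land := ["Sweden", "Norway", "Denmark", "Finland", "Iceland"]
  let nordic := PySem.Set.ofList land
  let groups : PySem.Dict String (List (List String)) :=
    list3.foldl (fun d rad =>
      match PySem.List.pyGet? rad 0 with
      | some k => if nordic.contains k then d.modify k [] (fun v => v ++ [rad]) else d
      | none => d) PySem.Dict.empty
  land.foldl (fun out w => out ++ groups.getD w []) []

-- ===== PRECONDITION & SPEC =====
-- Pre_ excludes inputs containing an empty row: there Python's rad[0] raises IndexError in both A and B.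
def Pre_nordland (list3 : List (List String)) : Prop := ∀ rad ∈ list3, rad ≠ []
instance (list3 : List (List String)) : Decidable (Pre_nordland list3) := by unfold Pre_nordland; infer_instance
def pvWitness_nordland : List (List String) := [["Norway", "1"], ["x"], ["Sweden"]]
def Spec_nordland (list3 : List (List String)) (out : List (List String)) : Prop := out = nordland_alt list3
instance (list3 : List (List String)) (out : List (List String)) : Decidable (Spec_nordland list3 out) := by unfold Spec_nordland; infer_instance

-- ===== CLAIM (what is proved, stated in full; the proofs are below) =====
def Claim_equal_nordland : Prop := ∀ (list3 : List (List String)), Dom_nordland list3 → Pre_nordland list3 → Spec_nordland list3 (nordland list3)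

-- ===== LEMMAS AND PROOFS =====

-- the grouping fold of B, named for the lemmas
def pvGroups (list3 : List (List String)) (d : PySem.Dict String (List (List String))) : PySem.Dict String (List (List String)) :=
  list3.foldl (fun d rad =>
    match PySem.List.pyGet? rad 0 with
    | some k => if (PySem.Set.ofList ["Sweden", "Norway", "Denmark", "Finland", "Iceland"]).contains k then d.modify k [] (fun v => v ++ [rad]) else d
    | none => d) d

theorem pvGroups_getD (list3 : List (List String)) (d : PySem.Dict String (List (List String)))
    (w : String) (hw : (PySem.Set.ofList ["Sweden", "Norway", "Denmark", "Finland", "Iceland"]).contains w = true) :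
    (pvGroups list3 d).getD w [] = d.getD w [] ++ list3.filter (fun rad => PySem.List.pyGet? rad 0 = some w) := by
  induction list3 generalizing d with
  | nil => simp [pvGroups]
  | cons rad rest ih =>
    have hstep : pvGroups (rad :: rest) d = pvGroups rest
        (match PySem.List.pyGet? rad 0 with
         | some k => if (PySem.Set.ofList ["Sweden", "Norway", "Denmark", "Finland", "Iceland"]).contains k then d.modify k [] (fun v => v ++ [rad]) else d
         | none => d) := rfl
    rw [hstep, List.filter_cons]
    cases hk : PySem.List.pyGet? rad 0 with
    | none => simp [ih d]
    | some k =>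
      simp only [hk]
      by_cases hkn : (PySem.Set.ofList ["Sweden", "Norway", "Denmark", "Finland", "Iceland"]).contains k = true
      · rw [if_pos hkn, ih]
        by_cases hwk : w = k
        · subst hwk
          rw [PySem.Dict.getD_modify_self]
          simp
        · rw [PySem.Dict.getD_modify_of_ne d [] _ hwk]
          have hne : ¬ (some k = some w) := fun h => hwk (Option.some.inj h).symm
          simp [hne]
      · rw [if_neg hkn, ih]
        have hne : ¬ (some k = some w) := fun h => hkn ((Option.some.inj h) ▸ hw)
        simp [hne]

theorem nordland_eq_alt (list3 : List (List String)) : nordland list3 = nordland_alt list3 := by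
  show _ = (["Sweden", "Norway", "Denmark", "Finland", "Iceland"]).foldl
      (fun out w => out ++ (pvGroups list3 PySem.Dict.empty).getD w []) []
  simp only [nordland, List.foldl_cons, List.foldl_nil,
    PySem.List.foldl_append_ite_eq_filter,
    pvGroups_getD list3 PySem.Dict.empty "Sweden" (by decide),
    pvGroups_getD list3 PySem.Dict.empty "Norway" (by decide),
    pvGroups_getD list3 PySem.Dict.empty "Denmark" (by decide),
    pvGroups_getD list3 PySem.Dict.empty "Finland" (by decide),
    pvGroups_getD list3 PySem.Dict.empty "Iceland" (by decide)]
  simp [PySem.Dict.getD, PySem.Dict.get?, PySem.Dict.empty]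

-- ===== VERDICT (by name: the statement is the Claim_ definition above) =====
theorem nordland_spec : Claim_equal_nordland := by
  intro list3 _ _
  exact nordland_eq_alt list3
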